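-- pv_equiv track=rewrite | github.com/ishoxo/Learning-in-Artificial-Neural-Networks-Using-Evolutionary-Game-Theory | mutation_network_mirror_removed.py | split_state
-- ===== SOURCE A (Python) =====
-- def split_state(state, input_size, connections, num_neurons):
--     states = []
--     length = input_size
--
--     for i in range(num_neurons):
--         s = []
--         for j in range(connections):
--             input = (i * (connections)) + j
--             s.append(state[input % length])
--         states.append(s)
--     return states
-- ===== SOURCE B (Python) =====
-- def split_state(state, input_size, connections, num_neurons):
--     rows = max(num_neurons, 0)
--     cols = max(connections, 0)
--     flat = [state[k % input_size] for k in range(rows * cols)]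
--     return [flat[i * cols:(i + 1) * cols] for i in range(rows)]
-- ===== Notes on version B (the rewrite author's own statement) =====
-- stated objective: alternative
-- what changed: Replaces the nested per-element modulo addressing with a flat one-pass build of the cyclic sequence state[k % input_size] for a single running counter k, then cuts it into per-neuron rows by whole-list slicing.
import Mathlib
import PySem

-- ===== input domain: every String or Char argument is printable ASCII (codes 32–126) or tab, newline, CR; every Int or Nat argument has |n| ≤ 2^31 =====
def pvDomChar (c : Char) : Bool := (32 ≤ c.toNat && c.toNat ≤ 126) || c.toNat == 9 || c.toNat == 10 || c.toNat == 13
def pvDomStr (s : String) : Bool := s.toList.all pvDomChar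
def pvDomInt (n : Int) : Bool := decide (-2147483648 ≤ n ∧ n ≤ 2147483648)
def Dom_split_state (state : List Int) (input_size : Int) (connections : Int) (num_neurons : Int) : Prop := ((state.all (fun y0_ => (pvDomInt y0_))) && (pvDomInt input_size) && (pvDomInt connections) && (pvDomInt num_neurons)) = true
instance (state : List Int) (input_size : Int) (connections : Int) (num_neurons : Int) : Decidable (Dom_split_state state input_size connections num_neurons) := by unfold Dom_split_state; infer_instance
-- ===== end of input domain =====

-- B replaces A's nested per-element modulo addressing by building the flat cyclic
-- sequence state[k % input_size] once and cutting it into rows by slicing (objective: alternative).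

-- ===== PORT A =====
def split_state (state : List Int) (input_size : Int) (connections : Int) (num_neurons : Int) : List (List Int) :=
  (PySem.List.pyRange 0 num_neurons 1).foldl (fun states i =>
    states ++ [(PySem.List.pyRange 0 connections 1).foldl (fun s j =>
      s ++ [PySem.List.pyGetD state (PySem.Int.mod (i * connections + j) input_size) 0]) []]) []

-- ===== PORT B =====
def split_state_alt (state : List Int) (input_size : Int) (connections : Int) (num_neurons : Int) : List (List Int) :=
  let rows := max num_neurons 0
  let cols := max connections 0
  let flat := (PySem.List.pyRange 0 (rows * cols) 1).map
    (fun k => PySem.List.pyGetD state (PySem.Int.mod k input_size) 0)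
  (PySem.List.pyRange 0 rows 1).map
    (fun i => PySem.List.slice flat (some (i * cols)) (some ((i + 1) * cols)))

-- ===== PRECONDITION & SPEC =====
-- Pre_ excludes exactly the inputs where Python A raises: with both loop counts positive,
-- input_size = 0 gives ZeroDivisionError, and an index (i*connections+j) % input_size
-- outside state's (negative-index) range gives IndexError.
def Pre_split_state (state : List Int) (input_size : Int) (connections : Int) (num_neurons : Int) : Prop :=
  connections ≤ 0 ∨ num_neurons ≤ 0 ∨
    (input_size ≠ 0 ∧ 1 ≤ (state.length : Int) ∧
     (0 < input_size → min input_size (num_neurons * connections) ≤ (state.length : Int)) ∧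
     (input_size ≤ -2 ∧ 2 ≤ num_neurons * connections → -(state.length : Int) ≤ input_size + 1))
instance (state : List Int) (input_size : Int) (connections : Int) (num_neurons : Int) : Decidable (Pre_split_state state input_size connections num_neurons) := by unfold Pre_split_state; infer_instance

def pvWitness_split_state : List Int × Int × Int × Int := ([1, 2, 3], 3, 2, 2)

def Spec_split_state (state : List Int) (input_size : Int) (connections : Int) (num_neurons : Int) (out : List (List Int)) : Prop := out = split_state_alt state input_size connections num_neurons
instance (state : List Int) (input_size : Int) (connections : Int) (num_neurons : Int) (out : List (List Int)) : Decidable (Spec_split_state state input_size connections num_neurons out) := by unfold Spec_split_state; infer_instance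

-- ===== CLAIM (what is proved, stated in full; the proofs are below) =====
def Claim_equal_split_state : Prop := ∀ (state : List Int) (input_size : Int) (connections : Int) (num_neurons : Int), Dom_split_state state input_size connections num_neurons → Pre_split_state state input_size connections num_neurons → Spec_split_state state input_size connections num_neurons (split_state state input_size connections num_neurons)

-- ===== LEMMAS AND PROOFS =====

-- slicing the flat range-map recovers one inner row
lemma slice_map_range (g : Nat → Int) (nN cN i : Nat) (hi : i < nN) :
    (((List.range (nN * cN)).map g).drop (i * cN)).take cN
      = (List.range cN).map (fun j => g (i * cN + j)) := by
  have hle : i * cN + cN ≤ nN * cN := by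
    calc i * cN + cN = (i + 1) * cN := by ring
      _ ≤ nN * cN := Nat.mul_le_mul_right _ (by omega)
  apply List.ext_getElem
  · simp
    omega
  · intro j h1 h2
    simp

-- both ports equal the same canonical double map (no precondition needed)
lemma ports_agree (state : List Int) (input_size connections num_neurons : Int) :
    split_state state input_size connections num_neurons
      = split_state_alt state input_size connections num_neurons := by
  unfold split_state split_state_alt
  rcases (by omega : connections ≤ 0 ∨ 0 < connections) with hc | hc
  · -- inner loops / rows are empty on both sides
    have hc0 : max connections 0 = 0 := by omega
    simp [hc0, PySem.List.pyRange_one_eq_nil hc, PySem.List.slice]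
    omega
  · rcases (by omega : num_neurons ≤ 0 ∨ 0 < num_neurons) with hn | hn
    · simp [PySem.List.pyRange_one_eq_nil hn, max_eq_right hn,
        PySem.List.pyRange_one_eq_nil (le_refl (0 : Int))]
    · -- both counts positive
      obtain ⟨cN, rfl⟩ : ∃ m : Nat, connections = ((m : Nat) : Int) :=
        ⟨connections.toNat, by omega⟩
      obtain ⟨nN, rfl⟩ : ∃ m : Nat, num_neurons = ((m : Nat) : Int) :=
        ⟨num_neurons.toNat, by omega⟩
      simp only [max_eq_left (Int.natCast_nonneg cN), max_eq_left (Int.natCast_nonneg nN)]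
      rw [← Nat.cast_mul, PySem.List.pyRange_zero_natCast, PySem.List.pyRange_zero_natCast,
        PySem.List.pyRange_zero_natCast]
      simp only [PySem.List.foldl_append_singleton_eq_map, List.map_map,
        Function.comp_def, List.nil_append]
      apply List.ext_getElem
      · simp
      · intro i h1 h2
        have hi : i < nN := by simpa using h1
        simp only [List.getElem_map, List.getElem_range]
        rw [show ((i : Nat) : Int) * ((cN : Nat) : Int) = ((i * cN : Nat) : Int) by
              push_cast; ring,
          show (((i : Nat) : Int) + 1) * ((cN : Nat) : Int) = ((i * cN + cN : Nat) : Int) by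
              push_cast; ring,
          PySem.List.slice_natCast]
        rw [show (i * cN + cN) - (i * cN) = cN by omega, slice_map_range _ nN cN i hi]
        refine List.map_congr_left ?_
        intro j hj
        congr 2

-- ===== VERDICT (by name: the statement is the Claim_ definition above) =====
theorem split_state_spec : Claim_equal_split_state := by
  intro state input_size connections num_neurons _ _
  exact ports_agree state input_size connections num_neurons
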